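-- pv_equiv track=rewrite | github.com/aguscurii05/IP-Algo-I | Parciales/SegundoParcial/Parcial.py | columnas_repetidas
-- ===== SOURCE A (Python) =====
-- def columnas_repetidas(mat:list[list[int]])->bool:
--     res:bool=True
--     for i in mat:
--         a=int(len(i)/2)
--         subres:bool=True
--         for j in range(0,a,1):
--             if i[j]==i[j+a]:
--                 subres= subres and True
--             else:
--                 subres= False
--         res=res and subres
--     return res
-- ===== SOURCE B (Python) =====
-- def columnas_repetidas(mat: list[list[int]]) -> bool:
--     return all(i[:len(i) // 2] == i[len(i) // 2:2 * (len(i) // 2)] for i in mat)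
-- ===== Notes on version B (the rewrite author's own statement) =====
-- stated objective: idiomatic
-- what changed: Replaces the nested index loop with boolean accumulators by a single all(...) over rows comparing the two half-slices i[:a] and i[a:2*a] as whole lists.
import Mathlib
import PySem

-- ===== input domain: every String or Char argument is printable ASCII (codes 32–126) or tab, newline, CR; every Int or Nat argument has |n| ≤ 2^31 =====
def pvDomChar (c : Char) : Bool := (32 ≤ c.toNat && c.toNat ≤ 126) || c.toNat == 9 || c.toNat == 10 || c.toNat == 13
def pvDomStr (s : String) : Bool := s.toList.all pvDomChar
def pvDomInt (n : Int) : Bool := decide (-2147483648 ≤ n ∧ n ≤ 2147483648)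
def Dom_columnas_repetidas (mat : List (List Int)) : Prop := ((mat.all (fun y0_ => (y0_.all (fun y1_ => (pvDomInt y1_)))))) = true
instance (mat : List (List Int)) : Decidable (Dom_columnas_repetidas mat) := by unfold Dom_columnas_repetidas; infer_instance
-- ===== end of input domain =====

-- B replaces A's nested index loop and boolean accumulators by all(...) over rows
-- comparing the two half-slices as whole lists (same cost, more idiomatic).

-- ===== PORT A =====
def columnas_repetidas (mat : List (List Int)) : Bool :=
  mat.foldl (fun res i =>
    let a : Int := ((i.length / 2 : Nat) : Int)  -- int(len(i)/2): exact, len nonneg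
    let subres : Bool :=
      (PySem.List.pyRange 0 a 1).foldl (fun subres j =>
        if PySem.List.pyGetD i j 0 == PySem.List.pyGetD i (j + a) 0 then
          subres && true
        else
          false) true
    res && subres) true

-- ===== PORT B =====
def columnas_repetidas_alt (mat : List (List Int)) : Bool :=
  mat.all (fun i =>
    let a : Int := ((i.length / 2 : Nat) : Int)
    PySem.List.slice i none (some a) == PySem.List.slice i (some a) (some (2 * a)))

-- ===== PRECONDITION & SPEC =====
def Spec_columnas_repetidas (mat : List (List Int)) (out : Bool) : Prop := out = columnas_repetidas_alt mat
instance (mat : List (List Int)) (out : Bool) : Decidable (Spec_columnas_repetidas mat out) := by unfold Spec_columnas_repetidas; infer_instance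

-- ===== CLAIM (what is proved, stated in full; the proofs are below) =====
def Claim_equal_columnas_repetidas : Prop := ∀ (mat : List (List Int)), Dom_columnas_repetidas mat → Spec_columnas_repetidas mat (columnas_repetidas mat)

-- ===== LEMMAS AND PROOFS =====

-- A's inner loop, started from s, computes s && "f j for all j < a" (f is the row test).
theorem pv_inner (f : Int → Bool) (a : Nat) (s : Bool) :
    (PySem.List.pyRange 0 (a : Int) 1).foldl (fun sub j => if f j then sub && true else false) s
      = (s && (List.range a).all (fun j => f (j : Int))) := by
  induction a generalizing s with
  | zero => simp [PySem.List.pyRange_one_eq_nil]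
  | succ n ih =>
    rw [show ((n + 1 : Nat) : Int) = (n : Int) + 1 by push_cast; ring,
      PySem.List.pyRange_one_succ_right (by positivity), List.foldl_append, List.range_succ]
    simp only [List.foldl_cons, List.foldl_nil, List.all_append, List.all_cons, List.all_nil, ih]
    by_cases hf : f (n : Int) = true
    · simp [hf]
    · rw [Bool.not_eq_true] at hf
      simp [hf]

-- the per-row check of A equals the per-row slice comparison of B
theorem pv_row (i : List Int) :
    (let a : Int := ((i.length / 2 : Nat) : Int)
     (PySem.List.pyRange 0 a 1).foldl (fun subres j =>
        if PySem.List.pyGetD i j 0 == PySem.List.pyGetD i (j + a) 0 then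
          subres && true
        else
          false) true)
      = (let a : Int := ((i.length / 2 : Nat) : Int)
         PySem.List.slice i none (some a) == PySem.List.slice i (some a) (some (2 * a))) := by
  simp only []
  set n := i.length with hn
  set a := n / 2 with ha
  have ha_le : a ≤ n := Nat.div_le_self _ _
  have ha2 : a + a ≤ n := by omega
  rw [pv_inner (fun j => PySem.List.pyGetD i j 0 == PySem.List.pyGetD i (j + (a : Int)) 0) a true]
  have h2a : (2 * (a : Int)) = ((a + a : Nat) : Int) := by push_cast; ring
  rw [h2a]
  have hslice : PySem.List.slice i (some (a : Int)) (some ((a + a : Nat) : Int))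
      = (i.drop a).take a := by
    rw [show ((a + a : Nat) : Int) = ((a : Nat) : Int) + ((a : Nat) : Int) by push_cast; ring]
    rw [PySem.List.slice_natCast_add]
  rw [PySem.List.slice_to_natCast, hslice, Bool.true_and]
  rw [Bool.eq_iff_iff]
  simp only [List.all_eq_true, List.mem_range, beq_iff_eq]
  constructor
  · intro h
    apply List.ext_getElem
    · simp; omega
    · intro j h1 h2
      simp only [List.length_take] at h1
      have hj : j < a := by omega
      have := h j hj
      have hjn : j < n := by omega
      have hjan : j + a < n := by omega
      rw [PySem.List.pyGetD_natCast] at this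
      rw [show ((j : Int) + (a : Int)) = ((j + a : Nat) : Int) by push_cast; ring,
        PySem.List.pyGetD_natCast] at this
      simp only [List.getD_eq_getElem?_getD, List.getElem?_eq_getElem (by omega : j < i.length),
        List.getElem?_eq_getElem (by omega : j + a < i.length), Option.getD_some] at this
      simpa [List.getElem_take, List.getElem_drop, Nat.add_comm] using this
  · intro h j hj
    have hjn : j < n := by omega
    have hjan : j + a < n := by omega
    have hlen1 : j < (i.take a).length := by simp; omega
    have hlen2 : j < ((i.drop a).take a).length := by simp; omega
    have := congrArg (fun l => l[j]?) h
    simp only [List.getElem?_eq_getElem hlen1, List.getElem?_eq_getElem hlen2,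
      Option.some.injEq] at this
    rw [PySem.List.pyGetD_natCast,
      show ((j : Int) + (a : Int)) = ((j + a : Nat) : Int) by push_cast; ring,
      PySem.List.pyGetD_natCast]
    simp only [List.getD_eq_getElem?_getD, List.getElem?_eq_getElem (by omega : j < i.length),
      List.getElem?_eq_getElem (by omega : j + a < i.length), Option.getD_some]
    simpa [List.getElem_take, List.getElem_drop, Nat.add_comm] using this

-- A's outer loop with accumulator s computes s && mat.all g
theorem pv_outer (l : List (List Int)) (g : List Int → Bool) (s : Bool) :
    l.foldl (fun res i => res && g i) s = (s && l.all g) := by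
  induction l generalizing s with
  | nil => simp
  | cons x xs ih => rw [List.foldl_cons, ih, List.all_cons, Bool.and_assoc]

-- ===== VERDICT (by name: the statement is the Claim_ definition above) =====
theorem columnas_repetidas_spec : Claim_equal_columnas_repetidas := by
  intro mat _
  unfold Spec_columnas_repetidas columnas_repetidas columnas_repetidas_alt
  rw [show (fun (res : Bool) (i : List Int) =>
        let a : Int := ((i.length / 2 : Nat) : Int)
        let subres : Bool :=
          (PySem.List.pyRange 0 a 1).foldl (fun subres j =>
            if PySem.List.pyGetD i j 0 == PySem.List.pyGetD i (j + a) 0 then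
              subres && true
            else
              false) true
        res && subres)
      = (fun (res : Bool) (i : List Int) => res &&
          ((PySem.List.pyRange 0 ((i.length / 2 : Nat) : Int) 1).foldl (fun subres j =>
            if PySem.List.pyGetD i j 0 == PySem.List.pyGetD i (j + ((i.length / 2 : Nat) : Int)) 0 then
              subres && true
            else
              false) true)) from rfl]
  rw [pv_outer, Bool.true_and]
  exact congrArg mat.all (funext fun i => pv_row i)
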